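-- pv_equiv track=rewrite | github.com/kintopp/rijksmuseum-mcp-plus | scripts/geocode_places.py | _existing_authority
-- ===== SOURCE A (Python) =====
-- def extract_qid(uri: str) -> str | None:
--     """Extract QID from Wikidata URI."""
--     for prefix in ("http://www.wikidata.org/entity/",
--                     "https://www.wikidata.org/entity/",
--                     "http://www.wikidata.org/wiki/",
--                     "https://www.wikidata.org/wiki/"):
--         if uri.startswith(prefix):
--             return uri[len(prefix):]
--     return None
--
-- def extract_geonames_id(uri: str) -> str | None:
--     """Extract numeric GeoNames ID from URI."""
--     for prefix in ("http://sws.geonames.org/", "https://sws.geonames.org/",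
--                     "http://www.geonames.org/", "https://www.geonames.org/"):
--         if uri.startswith(prefix):
--             return uri[len(prefix):].rstrip("/")
--     return None
--
-- def extract_tgn_id(uri: str) -> str | None:
--     """Extract TGN ID from Getty URI."""
--     prefix = "http://vocab.getty.edu/tgn/"
--     if uri.startswith(prefix):
--         return uri[len(prefix):]
--     return None
--
-- def _existing_authority(ext_id: str) -> tuple[str, str] | None:
--     """Identify the authority type and local ID from an existing external_id URI."""
--     checks = [
--         ("gn", "geonames.org/", extract_geonames_id),
--         ("tgn", "getty.edu/tgn/", extract_tgn_id),
--         ("wd", "wikidata.org/", extract_qid),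
--     ]
--     for key, marker, extractor in checks:
--         if marker in (ext_id or ""):
--             local = extractor(ext_id)
--             if local:
--                 return (key, local)
--     return None
-- ===== SOURCE B (Python) =====
-- def _existing_authority(ext_id):
--     """Identify the authority type and local ID from an existing external_id URI."""
--     table = (
--         ("gn", "http://sws.geonames.org/", True),
--         ("gn", "https://sws.geonames.org/", True),
--         ("gn", "http://www.geonames.org/", True),
--         ("gn", "https://www.geonames.org/", True),
--         ("tgn", "http://vocab.getty.edu/tgn/", False),
--         ("wd", "http://www.wikidata.org/entity/", False),
--         ("wd", "https://www.wikidata.org/entity/", False),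
--         ("wd", "http://www.wikidata.org/wiki/", False),
--         ("wd", "https://www.wikidata.org/wiki/", False),
--     )
--     s = ext_id or ""
--     for key, prefix, strip_slash in table:
--         if s.startswith(prefix):
--             local = s[len(prefix):]
--             if strip_slash:
--                 local = local.rstrip("/")
--             if local:
--                 return (key, local)
--     return None
-- ===== Notes on version B (the rewrite author's own statement) =====
-- stated objective: simpler
-- what changed: Inlined the three extractor helpers and collapsed A's two-level dispatch (substring-marker gate plus per-authority prefix loops) into one flat single-pass scan over a table of (key, full_prefix, rstrip_flag) entries.
import Mathlib
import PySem

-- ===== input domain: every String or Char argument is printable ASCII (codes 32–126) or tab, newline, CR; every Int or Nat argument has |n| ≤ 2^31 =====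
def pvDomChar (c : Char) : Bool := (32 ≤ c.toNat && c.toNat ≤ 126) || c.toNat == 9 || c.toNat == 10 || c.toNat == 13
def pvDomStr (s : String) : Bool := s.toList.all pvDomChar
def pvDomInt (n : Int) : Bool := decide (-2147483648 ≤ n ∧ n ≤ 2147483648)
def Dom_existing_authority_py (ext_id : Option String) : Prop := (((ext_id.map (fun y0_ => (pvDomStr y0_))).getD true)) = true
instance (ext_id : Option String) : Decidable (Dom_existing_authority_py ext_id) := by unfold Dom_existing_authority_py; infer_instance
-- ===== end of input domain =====

-- B inlines A's three extractor helpers and collapses A's two-level dispatch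
-- (substring-marker gate, then per-authority prefix loop) into one flat single-pass
-- scan over a table of (key, full_prefix, rstrip_flag) entries; objective: simpler.

-- ===== PORT A =====
-- s.rstrip("/"): PySem has no one-sided strip with a chars argument, so this is a
-- hand port (exact on all strings): drop the trailing '/' characters.
def pyRstripSlash (s : String) : String :=
  String.ofList ((s.toList.reverse.dropWhile (fun c => c == '/')).reverse)

def extract_qid_py (uri : String) : Option String :=
  if PySem.Str.startswith uri "http://www.wikidata.org/entity/" then
    some (PySem.Str.slice uri (some (PySem.Str.len "http://www.wikidata.org/entity/")) none)
  else if PySem.Str.startswith uri "https://www.wikidata.org/entity/" then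
    some (PySem.Str.slice uri (some (PySem.Str.len "https://www.wikidata.org/entity/")) none)
  else if PySem.Str.startswith uri "http://www.wikidata.org/wiki/" then
    some (PySem.Str.slice uri (some (PySem.Str.len "http://www.wikidata.org/wiki/")) none)
  else if PySem.Str.startswith uri "https://www.wikidata.org/wiki/" then
    some (PySem.Str.slice uri (some (PySem.Str.len "https://www.wikidata.org/wiki/")) none)
  else none

def extract_geonames_id_py (uri : String) : Option String :=
  if PySem.Str.startswith uri "http://sws.geonames.org/" then
    some (pyRstripSlash (PySem.Str.slice uri (some (PySem.Str.len "http://sws.geonames.org/")) none))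
  else if PySem.Str.startswith uri "https://sws.geonames.org/" then
    some (pyRstripSlash (PySem.Str.slice uri (some (PySem.Str.len "https://sws.geonames.org/")) none))
  else if PySem.Str.startswith uri "http://www.geonames.org/" then
    some (pyRstripSlash (PySem.Str.slice uri (some (PySem.Str.len "http://www.geonames.org/")) none))
  else if PySem.Str.startswith uri "https://www.geonames.org/" then
    some (pyRstripSlash (PySem.Str.slice uri (some (PySem.Str.len "https://www.geonames.org/")) none))
  else none

def extract_tgn_id_py (uri : String) : Option String :=
  if PySem.Str.startswith uri "http://vocab.getty.edu/tgn/" then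
    some (PySem.Str.slice uri (some (PySem.Str.len "http://vocab.getty.edu/tgn/")) none)
  else none

-- A's loop over the 3-element literal `checks` list, unrolled in source order
-- (gn, tgn, wd); the marker guard guarantees the extractor's actual argument
-- ext_id equals the string (ext_id or ""), which is what is passed here.
def a_check_wd (s : String) : Option (String × String) :=
  if PySem.Str.isIn "wikidata.org/" s then
    match extract_qid_py s with
    | some l => if l ≠ "" then some ("wd", l) else none
    | none => none
  else none

def a_check_tgn (s : String) : Option (String × String) :=
  if PySem.Str.isIn "getty.edu/tgn/" s then
    match extract_tgn_id_py s with
    | some l => if l ≠ "" then some ("tgn", l) else a_check_wd s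
    | none => a_check_wd s
  else a_check_wd s

def existing_authority_py (ext_id : Option String) : Option (String × String) :=
  let s := match ext_id with | some t => t | none => ""   -- (ext_id or "")
  if PySem.Str.isIn "geonames.org/" s then
    match extract_geonames_id_py s with
    | some l => if l ≠ "" then some ("gn", l) else a_check_tgn s
    | none => a_check_tgn s
  else a_check_tgn s

-- ===== PORT B =====
def altTable : List (String × String × Bool) :=
  [("gn", "http://sws.geonames.org/", true),
   ("gn", "https://sws.geonames.org/", true),
   ("gn", "http://www.geonames.org/", true),
   ("gn", "https://www.geonames.org/", true),
   ("tgn", "http://vocab.getty.edu/tgn/", false),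
   ("wd", "http://www.wikidata.org/entity/", false),
   ("wd", "https://www.wikidata.org/entity/", false),
   ("wd", "http://www.wikidata.org/wiki/", false),
   ("wd", "https://www.wikidata.org/wiki/", false)]

def altScan (s : String) : List (String × String × Bool) → Option (String × String)
  | [] => none
  | (key, pfx, stripSlash) :: rest =>
    if PySem.Str.startswith s pfx then
      let local0 := PySem.Str.slice s (some (PySem.Str.len pfx)) none
      let l := if stripSlash then pyRstripSlash local0 else local0
      if l ≠ "" then some (key, l) else altScan s rest
    else altScan s rest

def existing_authority_py_alt (ext_id : Option String) : Option (String × String) :=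
  let s := match ext_id with | some t => t | none => ""   -- (ext_id or "")
  altScan s altTable

-- ===== PRECONDITION & SPEC =====
def Spec_existing_authority_py (ext_id : Option String) (out : Option (String × String)) : Prop := out = existing_authority_py_alt ext_id
instance (ext_id : Option String) (out : Option (String × String)) : Decidable (Spec_existing_authority_py ext_id out) := by unfold Spec_existing_authority_py; infer_instance

-- ===== CLAIM (what is proved, stated in full; the proofs are below) =====
def Claim_equal_existing_authority_py : Prop := ∀ (ext_id : Option String), Dom_existing_authority_py ext_id → Spec_existing_authority_py ext_id (existing_authority_py ext_id)

-- ===== LEMMAS AND PROOFS =====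

-- If s starts with p, it cannot start with a q incomparable with p.
theorem pv_sw_excl {s p q : String} (hp : PySem.Str.startswith s p = true)
    (h : ¬ (p.toList <+: q.toList ∨ q.toList <+: p.toList)) :
    PySem.Str.startswith s q = false := by
  cases hq : PySem.Str.startswith s q with
  | false => rfl
  | true =>
    exact absurd (List.prefix_or_prefix_of_prefix
      ((PySem.Chars.startswith_iff _ _).mp (by simpa using hp))
      ((PySem.Chars.startswith_iff _ _).mp (by simpa using hq))) h

-- If s starts with p and m is a substring of p, then m is a substring of s.
theorem pv_isIn_of_sw {s p m : String} (hp : PySem.Str.startswith s p = true)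
    (hm : m.toList <:+: p.toList) : PySem.Str.isIn m s = true :=
  (PySem.Str.isIn_iff_infix _ _).mpr
    (hm.trans ((PySem.Chars.startswith_iff _ _).mp (by simpa using hp)).isInfix)

-- ===== VERDICT (by name: the statement is the Claim_ definition above) =====
set_option maxHeartbeats 2000000 in
theorem existing_authority_py_spec : Claim_equal_existing_authority_py := by
  intro ext_id _
  unfold Spec_existing_authority_py
  cases ext_id with
  | none =>
    simp [existing_authority_py, existing_authority_py_alt, a_check_tgn, a_check_wd,
      extract_geonames_id_py, extract_tgn_id_py, extract_qid_py, altScan, altTable]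
    decide
  | some s =>
    by_cases h0 : PySem.Str.startswith s "http://sws.geonames.org/" = true
    · -- s starts with "http://sws.geonames.org/"
      have e1 : PySem.Str.startswith s "https://sws.geonames.org/" = false := pv_sw_excl h0 (by decide)
      have e2 : PySem.Str.startswith s "http://www.geonames.org/" = false := pv_sw_excl h0 (by decide)
      have e3 : PySem.Str.startswith s "https://www.geonames.org/" = false := pv_sw_excl h0 (by decide)
      have e4 : PySem.Str.startswith s "http://vocab.getty.edu/tgn/" = false := pv_sw_excl h0 (by decide)
      have e5 : PySem.Str.startswith s "http://www.wikidata.org/entity/" = false := pv_sw_excl h0 (by decide)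
      have e6 : PySem.Str.startswith s "https://www.wikidata.org/entity/" = false := pv_sw_excl h0 (by decide)
      have e7 : PySem.Str.startswith s "http://www.wikidata.org/wiki/" = false := pv_sw_excl h0 (by decide)
      have e8 : PySem.Str.startswith s "https://www.wikidata.org/wiki/" = false := pv_sw_excl h0 (by decide)
      have m0 : PySem.Str.isIn "geonames.org/" s = true := pv_isIn_of_sw h0 (by decide)
      simp at h0 e1 e2 e3 e4 e5 e6 e7 e8 m0
      simp [existing_authority_py, existing_authority_py_alt, a_check_tgn, a_check_wd, extract_geonames_id_py, extract_tgn_id_py, extract_qid_py, altScan, altTable, h0, e1, e2, e3, e4, e5, e6, e7, e8, m0]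
    by_cases h1 : PySem.Str.startswith s "https://sws.geonames.org/" = true
    · -- s starts with "https://sws.geonames.org/"
      have e0 : PySem.Str.startswith s "http://sws.geonames.org/" = false := pv_sw_excl h1 (by decide)
      have e2 : PySem.Str.startswith s "http://www.geonames.org/" = false := pv_sw_excl h1 (by decide)
      have e3 : PySem.Str.startswith s "https://www.geonames.org/" = false := pv_sw_excl h1 (by decide)
      have e4 : PySem.Str.startswith s "http://vocab.getty.edu/tgn/" = false := pv_sw_excl h1 (by decide)
      have e5 : PySem.Str.startswith s "http://www.wikidata.org/entity/" = false := pv_sw_excl h1 (by decide)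
      have e6 : PySem.Str.startswith s "https://www.wikidata.org/entity/" = false := pv_sw_excl h1 (by decide)
      have e7 : PySem.Str.startswith s "http://www.wikidata.org/wiki/" = false := pv_sw_excl h1 (by decide)
      have e8 : PySem.Str.startswith s "https://www.wikidata.org/wiki/" = false := pv_sw_excl h1 (by decide)
      have m1 : PySem.Str.isIn "geonames.org/" s = true := pv_isIn_of_sw h1 (by decide)
      simp at h1 e0 e2 e3 e4 e5 e6 e7 e8 m1
      simp [existing_authority_py, existing_authority_py_alt, a_check_tgn, a_check_wd, extract_geonames_id_py, extract_tgn_id_py, extract_qid_py, altScan, altTable, h1, e0, e2, e3, e4, e5, e6, e7, e8, m1]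
    by_cases h2 : PySem.Str.startswith s "http://www.geonames.org/" = true
    · -- s starts with "http://www.geonames.org/"
      have e0 : PySem.Str.startswith s "http://sws.geonames.org/" = false := pv_sw_excl h2 (by decide)
      have e1 : PySem.Str.startswith s "https://sws.geonames.org/" = false := pv_sw_excl h2 (by decide)
      have e3 : PySem.Str.startswith s "https://www.geonames.org/" = false := pv_sw_excl h2 (by decide)
      have e4 : PySem.Str.startswith s "http://vocab.getty.edu/tgn/" = false := pv_sw_excl h2 (by decide)
      have e5 : PySem.Str.startswith s "http://www.wikidata.org/entity/" = false := pv_sw_excl h2 (by decide)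
      have e6 : PySem.Str.startswith s "https://www.wikidata.org/entity/" = false := pv_sw_excl h2 (by decide)
      have e7 : PySem.Str.startswith s "http://www.wikidata.org/wiki/" = false := pv_sw_excl h2 (by decide)
      have e8 : PySem.Str.startswith s "https://www.wikidata.org/wiki/" = false := pv_sw_excl h2 (by decide)
      have m2 : PySem.Str.isIn "geonames.org/" s = true := pv_isIn_of_sw h2 (by decide)
      simp at h2 e0 e1 e3 e4 e5 e6 e7 e8 m2
      simp [existing_authority_py, existing_authority_py_alt, a_check_tgn, a_check_wd, extract_geonames_id_py, extract_tgn_id_py, extract_qid_py, altScan, altTable, h2, e0, e1, e3, e4, e5, e6, e7, e8, m2]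
    by_cases h3 : PySem.Str.startswith s "https://www.geonames.org/" = true
    · -- s starts with "https://www.geonames.org/"
      have e0 : PySem.Str.startswith s "http://sws.geonames.org/" = false := pv_sw_excl h3 (by decide)
      have e1 : PySem.Str.startswith s "https://sws.geonames.org/" = false := pv_sw_excl h3 (by decide)
      have e2 : PySem.Str.startswith s "http://www.geonames.org/" = false := pv_sw_excl h3 (by decide)
      have e4 : PySem.Str.startswith s "http://vocab.getty.edu/tgn/" = false := pv_sw_excl h3 (by decide)
      have e5 : PySem.Str.startswith s "http://www.wikidata.org/entity/" = false := pv_sw_excl h3 (by decide)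
      have e6 : PySem.Str.startswith s "https://www.wikidata.org/entity/" = false := pv_sw_excl h3 (by decide)
      have e7 : PySem.Str.startswith s "http://www.wikidata.org/wiki/" = false := pv_sw_excl h3 (by decide)
      have e8 : PySem.Str.startswith s "https://www.wikidata.org/wiki/" = false := pv_sw_excl h3 (by decide)
      have m3 : PySem.Str.isIn "geonames.org/" s = true := pv_isIn_of_sw h3 (by decide)
      simp at h3 e0 e1 e2 e4 e5 e6 e7 e8 m3
      simp [existing_authority_py, existing_authority_py_alt, a_check_tgn, a_check_wd, extract_geonames_id_py, extract_tgn_id_py, extract_qid_py, altScan, altTable, h3, e0, e1, e2, e4, e5, e6, e7, e8, m3]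
    by_cases h4 : PySem.Str.startswith s "http://vocab.getty.edu/tgn/" = true
    · -- s starts with "http://vocab.getty.edu/tgn/"
      have e0 : PySem.Str.startswith s "http://sws.geonames.org/" = false := pv_sw_excl h4 (by decide)
      have e1 : PySem.Str.startswith s "https://sws.geonames.org/" = false := pv_sw_excl h4 (by decide)
      have e2 : PySem.Str.startswith s "http://www.geonames.org/" = false := pv_sw_excl h4 (by decide)
      have e3 : PySem.Str.startswith s "https://www.geonames.org/" = false := pv_sw_excl h4 (by decide)
      have e5 : PySem.Str.startswith s "http://www.wikidata.org/entity/" = false := pv_sw_excl h4 (by decide)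
      have e6 : PySem.Str.startswith s "https://www.wikidata.org/entity/" = false := pv_sw_excl h4 (by decide)
      have e7 : PySem.Str.startswith s "http://www.wikidata.org/wiki/" = false := pv_sw_excl h4 (by decide)
      have e8 : PySem.Str.startswith s "https://www.wikidata.org/wiki/" = false := pv_sw_excl h4 (by decide)
      have m4 : PySem.Str.isIn "getty.edu/tgn/" s = true := pv_isIn_of_sw h4 (by decide)
      simp at h4 e0 e1 e2 e3 e5 e6 e7 e8 m4
      simp [existing_authority_py, existing_authority_py_alt, a_check_tgn, a_check_wd, extract_geonames_id_py, extract_tgn_id_py, extract_qid_py, altScan, altTable, h4, e0, e1, e2, e3, e5, e6, e7, e8, m4]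
    by_cases h5 : PySem.Str.startswith s "http://www.wikidata.org/entity/" = true
    · -- s starts with "http://www.wikidata.org/entity/"
      have e0 : PySem.Str.startswith s "http://sws.geonames.org/" = false := pv_sw_excl h5 (by decide)
      have e1 : PySem.Str.startswith s "https://sws.geonames.org/" = false := pv_sw_excl h5 (by decide)
      have e2 : PySem.Str.startswith s "http://www.geonames.org/" = false := pv_sw_excl h5 (by decide)
      have e3 : PySem.Str.startswith s "https://www.geonames.org/" = false := pv_sw_excl h5 (by decide)
      have e4 : PySem.Str.startswith s "http://vocab.getty.edu/tgn/" = false := pv_sw_excl h5 (by decide)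
      have e6 : PySem.Str.startswith s "https://www.wikidata.org/entity/" = false := pv_sw_excl h5 (by decide)
      have e7 : PySem.Str.startswith s "http://www.wikidata.org/wiki/" = false := pv_sw_excl h5 (by decide)
      have e8 : PySem.Str.startswith s "https://www.wikidata.org/wiki/" = false := pv_sw_excl h5 (by decide)
      have m5 : PySem.Str.isIn "wikidata.org/" s = true := pv_isIn_of_sw h5 (by decide)
      simp at h5 e0 e1 e2 e3 e4 e6 e7 e8 m5
      simp [existing_authority_py, existing_authority_py_alt, a_check_tgn, a_check_wd, extract_geonames_id_py, extract_tgn_id_py, extract_qid_py, altScan, altTable, h5, e0, e1, e2, e3, e4, e6, e7, e8, m5]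
    by_cases h6 : PySem.Str.startswith s "https://www.wikidata.org/entity/" = true
    · -- s starts with "https://www.wikidata.org/entity/"
      have e0 : PySem.Str.startswith s "http://sws.geonames.org/" = false := pv_sw_excl h6 (by decide)
      have e1 : PySem.Str.startswith s "https://sws.geonames.org/" = false := pv_sw_excl h6 (by decide)
      have e2 : PySem.Str.startswith s "http://www.geonames.org/" = false := pv_sw_excl h6 (by decide)
      have e3 : PySem.Str.startswith s "https://www.geonames.org/" = false := pv_sw_excl h6 (by decide)
      have e4 : PySem.Str.startswith s "http://vocab.getty.edu/tgn/" = false := pv_sw_excl h6 (by decide)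
      have e5 : PySem.Str.startswith s "http://www.wikidata.org/entity/" = false := pv_sw_excl h6 (by decide)
      have e7 : PySem.Str.startswith s "http://www.wikidata.org/wiki/" = false := pv_sw_excl h6 (by decide)
      have e8 : PySem.Str.startswith s "https://www.wikidata.org/wiki/" = false := pv_sw_excl h6 (by decide)
      have m6 : PySem.Str.isIn "wikidata.org/" s = true := pv_isIn_of_sw h6 (by decide)
      simp at h6 e0 e1 e2 e3 e4 e5 e7 e8 m6
      simp [existing_authority_py, existing_authority_py_alt, a_check_tgn, a_check_wd, extract_geonames_id_py, extract_tgn_id_py, extract_qid_py, altScan, altTable, h6, e0, e1, e2, e3, e4, e5, e7, e8, m6]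
    by_cases h7 : PySem.Str.startswith s "http://www.wikidata.org/wiki/" = true
    · -- s starts with "http://www.wikidata.org/wiki/"
      have e0 : PySem.Str.startswith s "http://sws.geonames.org/" = false := pv_sw_excl h7 (by decide)
      have e1 : PySem.Str.startswith s "https://sws.geonames.org/" = false := pv_sw_excl h7 (by decide)
      have e2 : PySem.Str.startswith s "http://www.geonames.org/" = false := pv_sw_excl h7 (by decide)
      have e3 : PySem.Str.startswith s "https://www.geonames.org/" = false := pv_sw_excl h7 (by decide)
      have e4 : PySem.Str.startswith s "http://vocab.getty.edu/tgn/" = false := pv_sw_excl h7 (by decide)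
      have e5 : PySem.Str.startswith s "http://www.wikidata.org/entity/" = false := pv_sw_excl h7 (by decide)
      have e6 : PySem.Str.startswith s "https://www.wikidata.org/entity/" = false := pv_sw_excl h7 (by decide)
      have e8 : PySem.Str.startswith s "https://www.wikidata.org/wiki/" = false := pv_sw_excl h7 (by decide)
      have m7 : PySem.Str.isIn "wikidata.org/" s = true := pv_isIn_of_sw h7 (by decide)
      simp at h7 e0 e1 e2 e3 e4 e5 e6 e8 m7
      simp [existing_authority_py, existing_authority_py_alt, a_check_tgn, a_check_wd, extract_geonames_id_py, extract_tgn_id_py, extract_qid_py, altScan, altTable, h7, e0, e1, e2, e3, e4, e5, e6, e8, m7]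
    by_cases h8 : PySem.Str.startswith s "https://www.wikidata.org/wiki/" = true
    · -- s starts with "https://www.wikidata.org/wiki/"
      have e0 : PySem.Str.startswith s "http://sws.geonames.org/" = false := pv_sw_excl h8 (by decide)
      have e1 : PySem.Str.startswith s "https://sws.geonames.org/" = false := pv_sw_excl h8 (by decide)
      have e2 : PySem.Str.startswith s "http://www.geonames.org/" = false := pv_sw_excl h8 (by decide)
      have e3 : PySem.Str.startswith s "https://www.geonames.org/" = false := pv_sw_excl h8 (by decide)
      have e4 : PySem.Str.startswith s "http://vocab.getty.edu/tgn/" = false := pv_sw_excl h8 (by decide)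
      have e5 : PySem.Str.startswith s "http://www.wikidata.org/entity/" = false := pv_sw_excl h8 (by decide)
      have e6 : PySem.Str.startswith s "https://www.wikidata.org/entity/" = false := pv_sw_excl h8 (by decide)
      have e7 : PySem.Str.startswith s "http://www.wikidata.org/wiki/" = false := pv_sw_excl h8 (by decide)
      have m8 : PySem.Str.isIn "wikidata.org/" s = true := pv_isIn_of_sw h8 (by decide)
      simp at h8 e0 e1 e2 e3 e4 e5 e6 e7 m8
      simp [existing_authority_py, existing_authority_py_alt, a_check_tgn, a_check_wd, extract_geonames_id_py, extract_tgn_id_py, extract_qid_py, altScan, altTable, h8, e0, e1, e2, e3, e4, e5, e6, e7, m8]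
    -- no table prefix matches s
    have e0 := Bool.of_not_eq_true h0
    have e1 := Bool.of_not_eq_true h1
    have e2 := Bool.of_not_eq_true h2
    have e3 := Bool.of_not_eq_true h3
    have e4 := Bool.of_not_eq_true h4
    have e5 := Bool.of_not_eq_true h5
    have e6 := Bool.of_not_eq_true h6
    have e7 := Bool.of_not_eq_true h7
    have e8 := Bool.of_not_eq_true h8
    simp at e0 e1 e2 e3 e4 e5 e6 e7 e8
    simp [existing_authority_py, existing_authority_py_alt, a_check_tgn, a_check_wd, extract_geonames_id_py, extract_tgn_id_py, extract_qid_py, altScan, altTable, e0, e1, e2, e3, e4, e5, e6, e7, e8]
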